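-- pv_equiv track=rewrite | github.com/WXW322/tools_six | protocol_analysis/words_basic.py | get_loinfo
-- ===== SOURCE A (Python) =====
-- def get_loinfo(series_list,head_count):
--     t_result = {}
--     t_length = {}
--     i = 0
--     while (i < head_count):
--         t_result[i] = {}
--         t_length[i] = 0
--         i = i + 1
--     for series in series_list:
--         length = len(series)
--         i = 0
--         while (i < length and i < head_count):
--             t_length[i] = t_length[i] + 1
--             t_fre = t_result[i]
--             t_num = series[i]
--             if t_num not in t_fre:
--                 t_fre[t_num] = 1
--             else:
--                 t_fre[t_num] = t_fre[t_num] + 1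
--             i = i + 1
--     i = 0
--     while (i < head_count):
--         t_pre = t_result[i]
--         t_result[i] = sorted(t_pre.items(), key=lambda d: d[1], reverse=True)
--         i = i + 1
--     return t_result,t_length
-- ===== SOURCE B (Python) =====
-- def get_loinfo(series_list, head_count):
--     # Transpose-then-count: one grouping pass builds each position's column of values,
--     # then a per-position pass counts each column and sorts the counts.
--     columns = {}
--     for series in series_list:
--         for i in range(min(len(series), head_count)):
--             columns.setdefault(i, []).append(series[i])
--     t_result = {}
--     t_length = {}
--     for i in range(head_count):
--         col = columns.get(i, [])
--         counts = {}
--         for v in col: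
--             counts[v] = counts.get(v, 0) + 1
--         t_result[i] = sorted(counts.items(), key=lambda p: p[1], reverse=True)
--         t_length[i] = len(col)
--     return t_result, t_length
-- ===== Notes on version B (the rewrite author's own statement) =====
-- stated objective: alternative
-- what changed: A fuses everything into one pass of interleaved per-position count updates (init loop over all positions, nested while incrementing both a per-position frequency dict and a length dict in place, final in-place sorting loop); B decomposes it transpose-then-count: one grouping pass collects each position's column of raw values, then a separate per-position pass counts each column into a fresh dict, sorts the counts, and takes the column length.
import Mathlib
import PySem

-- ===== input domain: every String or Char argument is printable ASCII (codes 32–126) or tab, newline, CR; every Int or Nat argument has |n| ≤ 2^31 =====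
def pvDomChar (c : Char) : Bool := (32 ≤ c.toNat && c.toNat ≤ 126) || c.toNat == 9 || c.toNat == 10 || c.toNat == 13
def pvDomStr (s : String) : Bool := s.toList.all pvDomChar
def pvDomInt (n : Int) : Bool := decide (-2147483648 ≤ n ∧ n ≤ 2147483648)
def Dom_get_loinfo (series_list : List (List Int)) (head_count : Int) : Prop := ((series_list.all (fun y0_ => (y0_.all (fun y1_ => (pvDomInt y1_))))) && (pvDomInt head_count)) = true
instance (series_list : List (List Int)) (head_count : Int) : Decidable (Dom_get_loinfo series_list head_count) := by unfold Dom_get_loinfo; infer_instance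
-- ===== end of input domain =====

-- B re-implements A by a transpose-then-count decomposition (one pass per position: extract the
-- column, count it, sort the counts) instead of A's fused interleaved in-place dict updates;
-- objective: alternative (same cost class).

-- ===== PORT A =====
-- one step of A's inner 'while i < length and i < head_count' body; both keys it touches were
-- inserted by the init loop (0 ≤ i < head_count), so Python's t_length[i] / t_result[i] /
-- t_fre[t_num] reads never raise and modify/getD read exactly the stored values.
def aUpdate (series : List Int) (st : PySem.Dict Int (PySem.Dict Int Int) × PySem.Dict Int Int)
    (i : Int) : PySem.Dict Int (PySem.Dict Int Int) × PySem.Dict Int Int :=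
  let t_num := PySem.List.pyGetD series i 0   -- series[i], in range since 0 ≤ i < len(series)
  (st.1.modify i PySem.Dict.empty (fun t_fre =>
      if t_fre.contains t_num = false then t_fre.insert t_num 1
      else t_fre.insert t_num (t_fre.getD t_num 0 + 1)),
   st.2.modify i 0 (· + 1))

def get_loinfo (series_list : List (List Int)) (head_count : Int) :
    (List (Int × List (Int × Int))) × (List (Int × Int)) :=
  -- init while-loop: t_result[i] = {}, t_length[i] = 0 for i = 0, 1, ..., while i < head_count
  let init := (PySem.List.pyRange 0 head_count).foldl
      (fun st i => (st.1.insert i PySem.Dict.empty, st.2.insert i 0))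
      (PySem.Dict.empty, PySem.Dict.empty)
  -- for series in series_list: 'while i < length and i < head_count' = i over range of the min
  let mid := series_list.foldl
      (fun st series =>
        (PySem.List.pyRange 0 (min (series.length : Int) head_count)).foldl (aUpdate series) st)
      init
  -- final while-loop: t_result[i] = sorted(t_result[i].items(), key=lambda d: d[1], reverse=True);
  -- the in-place overwrite keeps the key order 0..head_count-1, rebuilt here in that same order
  let t_result := (PySem.List.pyRange 0 head_count).foldl
      (fun d i => d.insert i
        (PySem.List.sorted (mid.1.getD i PySem.Dict.empty).items (fun p => p.2) true))
      PySem.Dict.empty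
  (t_result.items, mid.2.items)

-- ===== PORT B =====
-- the grouping pass: columns.setdefault(i, []).append(series[i]) is exactly
-- 'columns.modify i [] (· ++ [series[i]])'; series[i] is in range since 0 ≤ i < len(series)
def bColumns (series_list : List (List Int)) (head_count : Int) : PySem.Dict Int (List Int) :=
  series_list.foldl (fun columns series =>
      (PySem.List.pyRange 0 (min (series.length : Int) head_count)).foldl
        (fun columns i => columns.modify i [] (· ++ [PySem.List.pyGetD series i 0])) columns)
    PySem.Dict.empty

def get_loinfo_alt (series_list : List (List Int)) (head_count : Int) :
    (List (Int × List (Int × Int))) × (List (Int × Int)) :=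
  -- per position i: col = columns.get(i, []), counts = counting loop over col, then
  -- t_result[i] = sorted(counts.items(), key=lambda p: p[1], reverse=True), t_length[i] = len(col)
  -- (Source B binds col once; it is written out twice here, the same pure value)
  let columns := bColumns series_list head_count
  let st := (PySem.List.pyRange 0 head_count).foldl
      (fun st i =>
        (st.1.insert i (PySem.List.sorted
            ((columns.getD i []).foldl (fun d v => d.insert v (d.getD v 0 + 1))
              PySem.Dict.empty).items (fun p => p.2) true),
         st.2.insert i ((columns.getD i []).length : Int)))
      (PySem.Dict.empty, PySem.Dict.empty)
  (st.1.items, st.2.items)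

-- ===== PRECONDITION & SPEC =====
def Spec_get_loinfo (series_list : List (List Int)) (head_count : Int) (out : (List (Int × List (Int × Int))) × (List (Int × Int))) : Prop := out = get_loinfo_alt series_list head_count
instance (series_list : List (List Int)) (head_count : Int) (out : (List (Int × List (Int × Int))) × (List (Int × Int))) : Decidable (Spec_get_loinfo series_list head_count out) := by unfold Spec_get_loinfo; infer_instance

-- ===== CLAIM (what is proved, stated in full; the proofs are below) =====
def Claim_equal_get_loinfo : Prop := ∀ (series_list : List (List Int)) (head_count : Int), Dom_get_loinfo series_list head_count → Spec_get_loinfo series_list head_count (get_loinfo series_list head_count)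

-- ===== LEMMAS AND PROOFS =====

-- proof-side value of position i's column: [s[i] for s in series_list if i < len(s)]
def bColumn (series_list : List (List Int)) (i : Int) : List Int :=
  (series_list.filter (fun s => decide (i < (s.length : Int)))).map
    (fun s => PySem.List.pyGetD s i 0)

lemma pyRange_zero_eq (m : Int) :
    PySem.List.pyRange 0 m = (List.range m.toNat).map (fun k : Nat => (k : Int)) := by
  rcases (show 0 ≤ m ∨ m < 0 by omega) with h | h
  · obtain ⟨n, rfl⟩ := Int.eq_ofNat_of_zero_le h
    rw [PySem.List.pyRange_zero_natCast]
    simp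
  · have h0 : m.toNat = 0 := Int.toNat_of_nonpos h.le
    rw [h0]
    simp only [List.range_zero, List.map_nil]
    rw [List.eq_nil_iff_forall_not_mem]
    intro x hx
    rw [PySem.List.mem_pyRange_one] at hx
    omega

lemma nodup_pyRange_zero (m : Int) : (PySem.List.pyRange 0 m).Nodup := by
  rw [pyRange_zero_eq]
  exact List.Nodup.map Nat.cast_injective List.nodup_range

lemma items_foldl_insert_fresh {ν : Type} (f : Int → ν) :
    ∀ (l : List Int) (d : PySem.Dict Int ν), (∀ i ∈ l, d.contains i = false) → l.Nodup →
    (l.foldl (fun d i => d.insert i (f i)) d).items = d.items ++ l.map (fun i => (i, f i)) := by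
  intro l
  induction l with
  | nil => intro d _ _; simp
  | cons a tl ih =>
    intro d hfresh hnd
    have ha : d.contains a = false := hfresh a (by simp)
    have hitems : (d.insert a (f a)).items = d.items ++ [(a, f a)] := by
      simp [PySem.Dict.insert, ha]
    have hfresh' : ∀ i ∈ tl, (d.insert a (f a)).contains i = false := by
      intro i hi
      rw [PySem.Dict.contains_insert]
      have hne : i ≠ a := by
        rintro rfl; exact (List.nodup_cons.mp hnd).1 hi
      simp [hne, hfresh i (List.mem_cons_of_mem _ hi)]
    rw [List.foldl_cons, ih _ hfresh' (List.nodup_cons.mp hnd).2, hitems]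
    simp

lemma getD_foldl_insert_fun {ν : Type} (f : Int → ν) (d0 : ν) :
    ∀ (l : List Int) (d : PySem.Dict Int ν) (i : Int),
    (l.foldl (fun d j => d.insert j (f j)) d).getD i d0 = if i ∈ l then f i else d.getD i d0 := by
  intro l
  induction l with
  | nil => intro d i; simp
  | cons a tl ih =>
    intro d i
    rw [List.foldl_cons, ih]
    by_cases hm : i ∈ tl
    · simp [hm]
    · by_cases he : i = a
      · subst he; simp [hm, PySem.Dict.getD_insert_self]
      · simp [hm, he, PySem.Dict.getD_insert_of_ne _ _ _ he]

lemma getD_foldl_modify_not_mem {ν : Type} (d0 : ν) (g : Int → ν → ν) :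
    ∀ (l : List Int) (d : PySem.Dict Int ν) (i : Int), i ∉ l →
    (l.foldl (fun t j => t.modify j d0 (g j)) d).getD i d0 = d.getD i d0 := by
  intro l
  induction l with
  | nil => intro d i _; rfl
  | cons a tl ih =>
    intro d i hi
    rw [List.foldl_cons, ih _ _ (fun h => hi (List.mem_cons_of_mem _ h)),
      PySem.Dict.getD_modify_of_ne]
    intro h; exact hi (h ▸ List.mem_cons_self)

lemma getD_foldl_modify_nodup {ν : Type} (d0 : ν) (g : Int → ν → ν) :
    ∀ (l : List Int), l.Nodup → ∀ (d : PySem.Dict Int ν) (i : Int),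
    (l.foldl (fun t j => t.modify j d0 (g j)) d).getD i d0 =
      if i ∈ l then g i (d.getD i d0) else d.getD i d0 := by
  intro l
  induction l with
  | nil => intro _ d i; rfl
  | cons a tl ih =>
    intro hnd d i
    rw [List.foldl_cons]
    by_cases he : i = a
    · subst he
      rw [getD_foldl_modify_not_mem _ _ _ _ _ (List.nodup_cons.mp hnd).1,
        PySem.Dict.getD_modify_self]
      simp
    · rw [ih (List.nodup_cons.mp hnd).2]
      rw [PySem.Dict.getD_modify_of_ne _ _ _ he]
      simp [he]

lemma branch_eq_modify (fre : PySem.Dict Int Int) (v : Int) :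
    (if fre.contains v = false then fre.insert v 1
     else fre.insert v (fre.getD v 0 + 1)) = fre.modify v 0 (· + 1) := by
  by_cases h : fre.contains v
  · simp [h, PySem.Dict.modify]
  · have h' : fre.contains v = false := by simpa using h
    rw [if_pos h']
    simp [PySem.Dict.modify, PySem.Dict.getD_of_not_contains _ _ h']

lemma keys_foldl_foldl_modify {ν : Type} (hc : Int) (d0 : ν) (g : List Int → Int → ν → ν) :
    ∀ (sl : List (List Int)) (t : PySem.Dict Int ν), t.keys = PySem.List.pyRange 0 hc →
    (sl.foldl (fun t s =>
        (PySem.List.pyRange 0 (min (s.length : Int) hc)).foldl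
          (fun t i => t.modify i d0 (g s i)) t) t).keys = PySem.List.pyRange 0 hc := by
  intro sl
  induction sl with
  | nil => intro t ht; exact ht
  | cons s tl ih =>
    intro t ht
    rw [List.foldl_cons]
    apply ih
    rw [PySem.Dict.keys_foldl_modify (f := fun _ i => g s i), ht,
      PySem.Set.update_eq_append_filter]
    have hnil : (PySem.Set.ofList (PySem.List.pyRange 0 (min (s.length : Int) hc))).filter
        (fun y => !(PySem.Set.contains (PySem.List.pyRange 0 hc) y)) = [] := by
      apply List.filter_eq_nil_iff.mpr
      intro y hy
      have hy' : y ∈ PySem.List.pyRange 0 (min (s.length : Int) hc) := by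
        exact (PySem.Set.mem_ofList _ _).mp hy
      rw [PySem.List.mem_pyRange_one] at hy'
      have hmem : y ∈ PySem.List.pyRange 0 hc := by
        rw [PySem.List.mem_pyRange_one]; omega
      simp only [PySem.Set.contains_eq_listContains]
      simp [hmem]
    rw [hnil, List.append_nil]

lemma midL_getD (hc : Int) :
    ∀ (sl : List (List Int)) (t : PySem.Dict Int Int) (i : Int), 0 ≤ i → i < hc →
    ((sl.foldl (fun t s =>
        (PySem.List.pyRange 0 (min (s.length : Int) hc)).foldl
          (fun t j => t.modify j 0 (· + 1)) t) t).getD i 0) =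
      t.getD i 0 + ((bColumn sl i).length : Int) := by
  intro sl
  induction sl with
  | nil => intro t i _ _; simp [bColumn]
  | cons s tl ih =>
    intro t i h0 hhc
    rw [List.foldl_cons, ih _ _ h0 hhc, PySem.Dict.getD_foldl_modify_add_one]
    have hc1 : List.count i (PySem.List.pyRange 0 (min (s.length : Int) hc)) =
        if i < (s.length : Int) then 1 else 0 := by
      by_cases hm : i < (s.length : Int)
      · rw [if_pos hm]
        apply List.count_eq_one_of_mem (nodup_pyRange_zero _)
        rw [PySem.List.mem_pyRange_one]; omega
      · rw [if_neg hm]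
        apply List.count_eq_zero_of_not_mem
        rw [PySem.List.mem_pyRange_one]; omega
    rw [hc1]
    by_cases hm : i < (s.length : Int)
    · simp [bColumn, hm]
      ring
    · simp [bColumn, hm]

lemma midR_getD (hc : Int) :
    ∀ (sl : List (List Int)) (t : PySem.Dict Int (PySem.Dict Int Int)) (i : Int),
      0 ≤ i → i < hc →
    ((sl.foldl (fun t s =>
        (PySem.List.pyRange 0 (min (s.length : Int) hc)).foldl
          (fun t j => t.modify j PySem.Dict.empty
            (fun fre => fre.modify (PySem.List.pyGetD s j 0) 0 (· + 1))) t) t).getD i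
        PySem.Dict.empty) =
      (bColumn sl i).foldl (fun fre v => fre.modify v 0 (· + 1)) (t.getD i PySem.Dict.empty) := by
  intro sl
  induction sl with
  | nil => intro t i _ _; simp [bColumn]
  | cons s tl ih =>
    intro t i h0 hhc
    rw [List.foldl_cons, ih _ _ h0 hhc]
    have hx : ((PySem.List.pyRange 0 (min (s.length : Int) hc)).foldl
          (fun t j => t.modify j PySem.Dict.empty
            (fun fre => fre.modify (PySem.List.pyGetD s j 0) 0 (· + 1))) t).getD i
          PySem.Dict.empty =
        if i ∈ PySem.List.pyRange 0 (min (s.length : Int) hc) then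
          (t.getD i PySem.Dict.empty).modify (PySem.List.pyGetD s i 0) 0 (· + 1)
        else t.getD i PySem.Dict.empty :=
      getD_foldl_modify_nodup PySem.Dict.empty
        (fun j fre => fre.modify (PySem.List.pyGetD s j 0) 0 (· + 1)) _
        (nodup_pyRange_zero _) t i
    rw [hx]
    by_cases hm : i < (s.length : Int)
    · have : i ∈ PySem.List.pyRange 0 (min (s.length : Int) hc) := by
        rw [PySem.List.mem_pyRange_one]; omega
      rw [if_pos this]
      simp [bColumn, hm]
    · have : i ∉ PySem.List.pyRange 0 (min (s.length : Int) hc) := by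
        rw [PySem.List.mem_pyRange_one]; omega
      rw [if_neg this]
      simp [bColumn, hm]

-- the grouping pass builds exactly the per-position columns
lemma bColumns_getD_aux (hc : Int) :
    ∀ (sl : List (List Int)) (d : PySem.Dict Int (List Int)) (i : Int), 0 ≤ i → i < hc →
    (sl.foldl (fun columns series =>
        (PySem.List.pyRange 0 (min (series.length : Int) hc)).foldl
          (fun columns i => columns.modify i [] (· ++ [PySem.List.pyGetD series i 0])) columns)
      d).getD i [] = d.getD i [] ++ bColumn sl i := by
  intro sl
  induction sl with
  | nil => intro d i _ _; simp [bColumn]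
  | cons s tl ih =>
    intro d i h0 hhc
    rw [List.foldl_cons, ih _ _ h0 hhc]
    have hx : ((PySem.List.pyRange 0 (min (s.length : Int) hc)).foldl
          (fun columns j => columns.modify j [] (· ++ [PySem.List.pyGetD s j 0])) d).getD i [] =
        if i ∈ PySem.List.pyRange 0 (min (s.length : Int) hc) then
          d.getD i [] ++ [PySem.List.pyGetD s i 0]
        else d.getD i [] :=
      getD_foldl_modify_nodup [] (fun j l => l ++ [PySem.List.pyGetD s j 0]) _
        (nodup_pyRange_zero _) d i
    rw [hx]
    by_cases hm : i < (s.length : Int)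
    · have : i ∈ PySem.List.pyRange 0 (min (s.length : Int) hc) := by
        rw [PySem.List.mem_pyRange_one]; omega
      rw [if_pos this]
      simp [bColumn, hm]
    · have : i ∉ PySem.List.pyRange 0 (min (s.length : Int) hc) := by
        rw [PySem.List.mem_pyRange_one]; omega
      rw [if_neg this]
      simp [bColumn, hm]

lemma bColumns_getD (sl : List (List Int)) (hc i : Int) (h0 : 0 ≤ i) (hhc : i < hc) :
    (bColumns sl hc).getD i [] = bColumn sl i := by
  unfold bColumns
  rw [bColumns_getD_aux hc sl _ i h0 hhc]
  simp

lemma mid_split (hc : Int) :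
    ∀ (sl : List (List Int)) (p : PySem.Dict Int (PySem.Dict Int Int)) (q : PySem.Dict Int Int),
    sl.foldl (fun st series =>
        (PySem.List.pyRange 0 (min (series.length : Int) hc)).foldl (aUpdate series) st) (p, q) =
      (sl.foldl (fun t s =>
          (PySem.List.pyRange 0 (min (s.length : Int) hc)).foldl
            (fun t j => t.modify j PySem.Dict.empty
              (fun fre => fre.modify (PySem.List.pyGetD s j 0) 0 (· + 1))) t) p,
       sl.foldl (fun t s =>
          (PySem.List.pyRange 0 (min (s.length : Int) hc)).foldl
            (fun t j => t.modify j 0 (· + 1)) t) q) := by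
  intro sl
  induction sl with
  | nil => intro p q; rfl
  | cons s tl ih =>
    intro p q
    have ha : aUpdate s = fun st i =>
        (st.1.modify i PySem.Dict.empty
          (fun fre => fre.modify (PySem.List.pyGetD s i 0) 0 (· + 1)),
         st.2.modify i 0 (· + 1)) := by
      funext st i
      simp [aUpdate, branch_eq_modify]
    simp only [List.foldl_cons, ha]
    rw [PySem.List.foldl_prod_mk
          (f := fun (t : PySem.Dict Int (PySem.Dict Int Int)) (j : Int) =>
            t.modify j PySem.Dict.empty
              (fun fre => fre.modify (PySem.List.pyGetD s j 0) 0 (· + 1)))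
          (g := fun (t : PySem.Dict Int Int) (j : Int) => t.modify j 0 (· + 1))]
    exact ih _ _

lemma get_loinfo_eq_alt (sl : List (List Int)) (hc : Int) :
    get_loinfo sl hc = get_loinfo_alt sl hc := by
  unfold get_loinfo get_loinfo_alt
  dsimp only
  rw [PySem.List.foldl_prod_mk
        (f := fun (d : PySem.Dict Int (PySem.Dict Int Int)) (i : Int) => d.insert i PySem.Dict.empty)
        (g := fun (d : PySem.Dict Int Int) (i : Int) => d.insert i 0)]
  rw [PySem.List.foldl_prod_mk
        (f := fun (d : PySem.Dict Int (List (Int × Int))) (i : Int) =>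
          d.insert i (PySem.List.sorted
            (((bColumns sl hc).getD i []).foldl (fun d v => d.insert v (d.getD v 0 + 1))
              PySem.Dict.empty).items
            (fun p => p.2) true))
        (g := fun (d : PySem.Dict Int Int) (i : Int) =>
          d.insert i (((bColumns sl hc).getD i []).length : Int))]
  rw [mid_split]
  have hR : (PySem.List.pyRange 0 hc).Nodup := nodup_pyRange_zero hc
  have hfresh2 : ∀ i ∈ PySem.List.pyRange 0 hc,
      (PySem.Dict.empty (κ := Int) (ν := Int)).contains i = false := by
    intro i _; simp
  have hfresh3 : ∀ i ∈ PySem.List.pyRange 0 hc,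
      (PySem.Dict.empty (κ := Int) (ν := List (Int × Int))).contains i = false := by
    intro i _; simp
  -- the length component
  have hinit2 : ((PySem.List.pyRange 0 hc).foldl
      (fun (d : PySem.Dict Int Int) (i : Int) => d.insert i 0) PySem.Dict.empty).items =
      (PySem.List.pyRange 0 hc).map (fun i => (i, (0 : Int))) := by
    rw [items_foldl_insert_fresh (fun _ => (0 : Int)) _ _ hfresh2 hR]
    rfl
  have hkeys2 : ((PySem.List.pyRange 0 hc).foldl
      (fun (d : PySem.Dict Int Int) (i : Int) => d.insert i 0) PySem.Dict.empty).keys =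
      PySem.List.pyRange 0 hc := by
    simp only [PySem.Dict.keys, hinit2]
    simp [Function.comp_def]
  have hmidkeys : (sl.foldl (fun t s =>
        (PySem.List.pyRange 0 (min (s.length : Int) hc)).foldl
          (fun t j => t.modify j 0 (· + 1)) t)
      ((PySem.List.pyRange 0 hc).foldl
        (fun (d : PySem.Dict Int Int) (i : Int) => d.insert i 0) PySem.Dict.empty)).keys =
      PySem.List.pyRange 0 hc :=
    keys_foldl_foldl_modify hc 0 (fun _ _ => (· + 1)) sl _ hkeys2
  have h2 : (sl.foldl (fun t s =>
        (PySem.List.pyRange 0 (min (s.length : Int) hc)).foldl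
          (fun t j => t.modify j 0 (· + 1)) t)
      ((PySem.List.pyRange 0 hc).foldl
        (fun (d : PySem.Dict Int Int) (i : Int) => d.insert i 0) PySem.Dict.empty)).items =
      (PySem.List.pyRange 0 hc).map (fun i => (i, ((bColumn sl i).length : Int))) := by
    rw [PySem.Dict.items_eq_map_keys _ (hmidkeys.symm ▸ hR) 0, hmidkeys]
    apply List.map_congr_left
    intro i hi
    rw [PySem.List.mem_pyRange_one] at hi
    rw [midL_getD hc sl _ i hi.1 hi.2,
      getD_foldl_insert_fun (fun _ => (0 : Int)) 0]
    split <;> simp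
  -- the frequency component
  have h1 : ∀ i : Int, 0 ≤ i → i < hc →
      ((sl.foldl (fun t s =>
          (PySem.List.pyRange 0 (min (s.length : Int) hc)).foldl
            (fun t j => t.modify j PySem.Dict.empty
              (fun fre => fre.modify (PySem.List.pyGetD s j 0) 0 (· + 1))) t)
        ((PySem.List.pyRange 0 hc).foldl
          (fun (d : PySem.Dict Int (PySem.Dict Int Int)) (i : Int) =>
            d.insert i PySem.Dict.empty) PySem.Dict.empty)).getD i PySem.Dict.empty) =
      (bColumn sl i).foldl (fun d v => d.insert v (d.getD v 0 + 1)) PySem.Dict.empty := by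
    intro i h0 hh
    rw [midR_getD hc sl _ i h0 hh,
      getD_foldl_insert_fun (fun _ => (PySem.Dict.empty : PySem.Dict Int Int)) PySem.Dict.empty,
      PySem.Dict.foldl_insert_getD_add_one_eq_counter, PySem.Dict.counter_eq_foldl]
    split <;> rfl
  simp only [Prod.mk.injEq]
  constructor
  · rw [items_foldl_insert_fresh _ _ _ hfresh3 hR,
      items_foldl_insert_fresh _ _ _ hfresh3 hR]
    congr 1
    apply List.map_congr_left
    intro i hi
    rw [PySem.List.mem_pyRange_one] at hi
    rw [h1 i hi.1 hi.2, bColumns_getD sl hc i hi.1 hi.2]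
  · rw [h2, items_foldl_insert_fresh
      (fun i => (((bColumns sl hc).getD i []).length : Int)) _ _ hfresh2 hR]
    rw [show (PySem.Dict.empty (κ := Int) (ν := Int)).items = [] from rfl, List.nil_append]
    apply List.map_congr_left
    intro i hi
    rw [PySem.List.mem_pyRange_one] at hi
    rw [bColumns_getD sl hc i hi.1 hi.2]


-- ===== VERDICT (by name: the statement is the Claim_ definition above) =====
theorem get_loinfo_spec : Claim_equal_get_loinfo := by
  intro series_list head_count _
  unfold Spec_get_loinfo
  exact get_loinfo_eq_alt series_list head_count
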